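-- pv_equiv track=rewrite | github.com/Roddek-Dev/python_validacion | organizador_documentos/core/file_classifier.py | _determine_reason
-- ===== SOURCE A (Python) =====
-- from typing import Dict, List, Tuple, Optional
--
-- def _determine_reason(found_keywords: List[str]) -> str:
--     """Determina la razón de clasificación basada en keywords encontradas."""
--     if any(kw.startswith("folder:") for kw in found_keywords):
--         return "carpeta_padre"
--     elif any(kw.startswith("content:") for kw in found_keywords):
--         return "contenido"
--     elif any(kw.startswith("ocr:") for kw in found_keywords):
--         return "ocr"
--     else:
--         return "nombre_archivo"
-- ===== SOURCE B (Python) =====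
-- def _determine_reason(found_keywords):
--     """Determina la razón de clasificación basada en keywords encontradas."""
--     present = set()
--     for kw in found_keywords:
--         head, sep, _tail = kw.partition(":")
--         if sep:
--             present.add(head)
--     for prefix, reason in (("folder", "carpeta_padre"),
--                            ("content", "contenido"),
--                            ("ocr", "ocr")):
--         if prefix in present:
--             return reason
--     return "nombre_archivo"
-- ===== Notes on version B (the rewrite author's own statement) =====
-- stated objective: alternative
-- what changed: Replaces three separate short-circuit scans of the list with one pass that collects each keyword's ':'-prefix into a set, followed by a priority lookup in that set.
import Mathlib
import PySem

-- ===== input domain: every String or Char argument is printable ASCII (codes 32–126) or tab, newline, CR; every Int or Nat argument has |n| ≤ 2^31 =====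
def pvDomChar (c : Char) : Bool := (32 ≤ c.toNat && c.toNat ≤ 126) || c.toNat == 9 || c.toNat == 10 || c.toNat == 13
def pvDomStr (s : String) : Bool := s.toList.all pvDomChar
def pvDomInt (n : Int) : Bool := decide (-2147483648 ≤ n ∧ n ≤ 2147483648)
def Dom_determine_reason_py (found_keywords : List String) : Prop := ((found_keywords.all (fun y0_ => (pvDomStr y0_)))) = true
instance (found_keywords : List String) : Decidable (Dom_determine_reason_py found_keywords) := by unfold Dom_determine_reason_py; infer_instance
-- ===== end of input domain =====

-- B replaces A's three separate short-circuit scans by one pass that collects each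
-- keyword's ':'-prefix into a set, then a priority lookup (alternative decomposition).

-- ===== PORT A =====
def determine_reason_py (found_keywords : List String) : String :=
  if found_keywords.any (fun kw => PySem.Str.startswith kw "folder:") then "carpeta_padre"
  else if found_keywords.any (fun kw => PySem.Str.startswith kw "content:") then "contenido"
  else if found_keywords.any (fun kw => PySem.Str.startswith kw "ocr:") then "ocr"
  else "nombre_archivo"

-- ===== PORT B =====
-- kw.partition(":") ported by hand: head = chars before the first ':', sep nonempty iff ':' occurs — exact.
def pvCollectPrefixes (found_keywords : List String) : PySem.Set String :=
  found_keywords.foldl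
    (fun present kw =>
      if ':' ∈ kw.toList then
        PySem.Set.add present (String.ofList (kw.toList.takeWhile (· ≠ ':')))
      else present)
    PySem.Set.empty

def determine_reason_py_alt (found_keywords : List String) : String :=
  let present := pvCollectPrefixes found_keywords
  if PySem.Set.contains present "folder" then "carpeta_padre"
  else if PySem.Set.contains present "content" then "contenido"
  else if PySem.Set.contains present "ocr" then "ocr"
  else "nombre_archivo"

-- ===== PRECONDITION & SPEC =====
def Spec_determine_reason_py (found_keywords : List String) (out : String) : Prop := out = determine_reason_py_alt found_keywords
instance (found_keywords : List String) (out : String) : Decidable (Spec_determine_reason_py found_keywords out) := by unfold Spec_determine_reason_py; infer_instance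

-- ===== CLAIM (what is proved, stated in full; the proofs are below) =====
def Claim_equal_determine_reason_py : Prop := ∀ (found_keywords : List String), Dom_determine_reason_py found_keywords → Spec_determine_reason_py found_keywords (determine_reason_py found_keywords)

-- ===== LEMMAS AND PROOFS =====

-- If ':' occurs in l, l splits as its colon-free prefix, ':', and a remainder.
theorem pv_split_at_colon (l : List Char) (h : ':' ∈ l) :
    ∃ rest, l = l.takeWhile (· ≠ ':') ++ ':' :: rest := by
  induction l with
  | nil => cases h
  | cons c t ih =>
    by_cases hc : c = ':'
    · exact ⟨t, by subst hc; rw [List.takeWhile_cons_of_neg (by simp)]; rfl⟩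
    · have ht : ':' ∈ t := by
        cases List.mem_cons.mp h with
        | inl h' => exact absurd h'.symm hc
        | inr h' => exact h'
      obtain ⟨rest, hrest⟩ := ih ht
      refine ⟨rest, ?_⟩
      rw [List.takeWhile_cons_of_pos (by simpa using hc), List.cons_append]
      exact congrArg (List.cons c) hrest
-- The colon-free prefix of cs ++ ':' :: rest is cs.
theorem pv_takeWhile_no_colon (cs rest : List Char) (hcs : ':' ∉ cs) :
    (cs ++ ':' :: rest).takeWhile (· ≠ ':') = cs := by
  induction cs with
  | nil => rw [List.nil_append, List.takeWhile_cons_of_neg (by simp)]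
  | cons c t ih =>
    have hc : c ≠ ':' := fun h => hcs (h ▸ List.mem_cons_self ..)
    have ht : ':' ∉ t := fun h => hcs (List.mem_cons_of_mem _ h)
    rw [List.cons_append, List.takeWhile_cons_of_pos (by simpa using hc), ih ht]

-- For colon-free cs, "starts with cs ++ ':'" ↔ "contains ':' and the colon-free prefix is cs".
theorem pv_startswith_iff_prefix (cs l : List Char) (hcs : ':' ∉ cs) :
    (cs ++ [':']) <+: l ↔ (':' ∈ l ∧ l.takeWhile (· ≠ ':') = cs) := by
  constructor
  · rintro ⟨rest, hrest⟩
    subst hrest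
    rw [List.append_assoc]
    exact ⟨by simp, pv_takeWhile_no_colon cs rest hcs⟩
  · rintro ⟨hmem, htw⟩
    obtain ⟨rest, hrest⟩ := pv_split_at_colon l hmem
    exact ⟨rest, by rw [hrest, htw]; simp⟩

-- Membership in the collected prefix set.
theorem pv_mem_collect (found_keywords : List String) (s : PySem.Set String) (p : String) :
    p ∈ found_keywords.foldl
      (fun present kw =>
        if ':' ∈ kw.toList then
          PySem.Set.add present (String.ofList (kw.toList.takeWhile (· ≠ ':')))
        else present) s
    ↔ p ∈ s ∨ ∃ kw ∈ found_keywords, ':' ∈ kw.toList ∧ String.ofList (kw.toList.takeWhile (· ≠ ':')) = p := by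
  induction found_keywords generalizing s with
  | nil => simp
  | cons kw t ih =>
    simp only [List.foldl_cons, List.mem_cons]
    by_cases h : ':' ∈ kw.toList
    · rw [if_pos h, ih]
      simp only [PySem.Set.mem_add]
      constructor
      · rintro (⟨hs | he⟩ | ⟨k, hk, hc2, hp⟩)
        · exact Or.inl hs
        · exact Or.inr ⟨kw, Or.inl rfl, h, he.symm⟩
        · exact Or.inr ⟨k, Or.inr hk, hc2, hp⟩
      · rintro (hs | ⟨k, hk | hk, hc2, hp⟩)
        · exact Or.inl (Or.inl hs)
        · subst hk; exact Or.inl (Or.inr hp.symm)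
        · exact Or.inr ⟨k, hk, hc2, hp⟩
    · rw [if_neg h, ih]
      constructor
      · rintro (hs | ⟨k, hk, hc2, hp⟩)
        · exact Or.inl hs
        · exact Or.inr ⟨k, Or.inr hk, hc2, hp⟩
      · rintro (hs | ⟨k, hk | hk, hc2, hp⟩)
        · exact Or.inl hs
        · exact absurd (hk ▸ hc2) h
        · exact Or.inr ⟨k, hk, hc2, hp⟩

-- contains on the collected set = A's any-scan, for a colon-free prefix p.
theorem pv_contains_eq_any (found_keywords : List String) (p pc : String) (hp : ':' ∉ p.toList)
    (hpc : pc.toList = p.toList ++ [':']) :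
    PySem.Set.contains (pvCollectPrefixes found_keywords) p
      = found_keywords.any (fun kw => PySem.Str.startswith kw pc) := by
  have hmem : p ∈ pvCollectPrefixes found_keywords
      ↔ ∃ kw ∈ found_keywords, ':' ∈ kw.toList ∧ String.ofList (kw.toList.takeWhile (· ≠ ':')) = p := by
    unfold pvCollectPrefixes
    rw [pv_mem_collect]
    simp [PySem.Set.empty]
  have hofl : ∀ l : List Char, String.ofList l = p ↔ l = p.toList := by
    intro l
    constructor
    · intro h; simpa using congrArg String.toList h
    · intro h; rw [h]; simp
  have hsw : ∀ kw : String, PySem.Str.startswith kw pc = true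
      ↔ (':' ∈ kw.toList ∧ String.ofList (kw.toList.takeWhile (· ≠ ':')) = p) := by
    intro kw
    rw [PySem.Str.startswith_eq, hpc, PySem.Chars.startswith_iff,
      pv_startswith_iff_prefix p.toList kw.toList hp, hofl]
  apply Bool.eq_iff_iff.mpr
  rw [PySem.Set.contains_iff, hmem, List.any_eq_true]
  constructor
  · rintro ⟨kw, hkw, hc2, hp2⟩
    exact ⟨kw, hkw, (hsw kw).mpr ⟨hc2, hp2⟩⟩
  · rintro ⟨kw, hkw, hsw'⟩
    exact ⟨kw, hkw, ((hsw kw).mp hsw').1, ((hsw kw).mp hsw').2⟩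

-- ===== VERDICT (by name: the statement is the Claim_ definition above) =====
theorem determine_reason_py_spec : Claim_equal_determine_reason_py := by
  intro found_keywords _
  unfold Spec_determine_reason_py determine_reason_py determine_reason_py_alt
  simp only [pv_contains_eq_any found_keywords "folder" "folder:" (by decide) (by decide),
    pv_contains_eq_any found_keywords "content" "content:" (by decide) (by decide),
    pv_contains_eq_any found_keywords "ocr" "ocr:" (by decide) (by decide)]
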